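-- pv_equiv track=rewrite | github.com/LanghiDev/news-challenge-thoughtful | utils/string_utils.py | search_money_in_words
-- ===== SOURCE A (Python) =====
-- def search_money_in_words(words: list):
--     money_found_maybe: bool = False
--     for word in words:
--         if money_found_maybe and (word.find('$') >= 0 or word.find('dollar') >= 0 or word.find('usd')) >= 0:
--             return True
--         else:
--             money_found_maybe = False
--
--         if any(letter for letter in word if letter.isnumeric()):  # if detects that has a number, could be money
--             if any(letter for letter in word if letter == '$'):  # if detects '$' character, it's a money
--                 return True
--             money_found_maybe = True  # if didn't detects '$', can detects 'dollar' or 'usd' in next word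
--     return False
-- ===== SOURCE B (Python) =====
-- def search_money_in_words(words: list):
--     def has_digit(w):
--         return any(c.isnumeric() for c in w)
--
--     def money_hint(w):
--         return '$' in w or 'dollar' in w or 'usd' in w
--
--     return any(has_digit(w) and '$' in w for w in words) or \
--         any(has_digit(a) and money_hint(b) for a, b in zip(words, words[1:]))
-- ===== Notes on version B (the rewrite author's own statement) =====
-- stated objective: simpler
-- what changed: Replaces the stateful one-step 'money_found_maybe' flag and early returns with two declarative passes: any() over words for digit+'$' in the same word, and any() over zip(words, words[1:]) for a digit word followed by a '$'/'dollar'/'usd' word.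
import Mathlib
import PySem

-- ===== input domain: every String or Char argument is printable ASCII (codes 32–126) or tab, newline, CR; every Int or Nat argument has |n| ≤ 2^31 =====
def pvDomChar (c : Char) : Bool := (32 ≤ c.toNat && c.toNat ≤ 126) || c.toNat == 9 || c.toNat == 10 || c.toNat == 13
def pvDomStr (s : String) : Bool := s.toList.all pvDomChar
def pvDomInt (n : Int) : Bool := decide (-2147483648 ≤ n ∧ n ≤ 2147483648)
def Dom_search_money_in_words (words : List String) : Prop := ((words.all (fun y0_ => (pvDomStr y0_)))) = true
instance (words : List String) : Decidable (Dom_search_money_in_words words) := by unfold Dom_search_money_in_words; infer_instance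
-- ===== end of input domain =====

-- B replaces A's stateful one-step flag loop with two declarative any-passes (same word
-- digit+'$', or adjacent pair digit-word then money-word); objective: simpler. A is total.


-- ===== PORT A =====
-- Python's parenthesized or-chain '(find('$')>=0 or find('dollar')>=0 or find('usd'))' yields
-- True (= 1) from a true comparison, else the int find('usd'); the whole is then compared '>= 0'.
def pvAOrChain (w : String) : Int :=
  if PySem.Str.find w "$" ≥ 0 then 1
  else if PySem.Str.find w "dollar" ≥ 0 then 1
  else PySem.Str.find w "usd"

-- 'any(letter for letter in word if letter.isnumeric())': filter then any-truthy; a char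
-- (a 1-char Python string) is always truthy. isnumeric = isdigit, exact on the ASCII domain.
def pvALoop : List String → Bool → Bool
  | [], _ => false
  | w :: ws, flag =>
    if flag && decide (pvAOrChain w ≥ 0) then true
    else
      -- else branch: money_found_maybe = False (then possibly re-set below)
      if (w.toList.filter (fun l => PySem.Chars.isdigit l)).any (fun _ => true) then
        if (w.toList.filter (fun l => l == '$')).any (fun _ => true) then true
        else pvALoop ws true
      else pvALoop ws false

def search_money_in_words (words : List String) : Bool := pvALoop words false

-- ===== PORT B =====
-- 'any(c.isnumeric() for c in w)'; isnumeric = isdigit, exact on the ASCII domain.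
def pvHasDigit (w : String) : Bool := w.toList.any (fun c => PySem.Chars.isdigit c)

def pvMoneyHint (w : String) : Bool :=
  PySem.Str.isIn "$" w || PySem.Str.isIn "dollar" w || PySem.Str.isIn "usd" w

def search_money_in_words_alt (words : List String) : Bool :=
  (words.any (fun w => pvHasDigit w && PySem.Str.isIn "$" w)) ||
  ((words.zip (PySem.List.slice words (some 1) none)).any
      (fun p => pvHasDigit p.1 && pvMoneyHint p.2))

-- ===== PRECONDITION & SPEC =====
def Spec_search_money_in_words (words : List String) (out : Bool) : Prop := out = search_money_in_words_alt words
instance (words : List String) (out : Bool) : Decidable (Spec_search_money_in_words words out) := by unfold Spec_search_money_in_words; infer_instance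

-- ===== CLAIM (what is proved, stated in full; the proofs are below) =====
def Claim_equal_search_money_in_words : Prop := ∀ (words : List String), Dom_search_money_in_words words → Spec_search_money_in_words words (search_money_in_words words)

-- ===== LEMMAS AND PROOFS =====

lemma pvALoop_cons (w : String) (ws : List String) (flag : Bool) :
    pvALoop (w :: ws) flag =
      (if flag && decide (pvAOrChain w ≥ 0) then true
       else
         if (w.toList.filter (fun l => PySem.Chars.isdigit l)).any (fun _ => true) then
           if (w.toList.filter (fun l => l == '$')).any (fun _ => true) then true
           else pvALoop ws true
         else pvALoop ws false) := rfl

-- filter-then-any-truthy is just any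
lemma pv_filter_any (l : List Char) (p : Char → Bool) :
    (l.filter p).any (fun _ => true) = l.any p := by
  induction l with
  | nil => rfl
  | cons c t ih => by_cases h : p c <;> simp [List.filter, h, ih]

lemma pv_isIn_eq_decide (sub s : List Char) :
    PySem.Chars.isIn sub s = decide (0 ≤ PySem.Chars.find s sub) := by
  rcases Bool.eq_false_or_eq_true (PySem.Chars.isIn sub s) with h | h <;> rw [h]
  · have hn := (PySem.Chars.isIn_iff_infix sub s).mp h
    rw [← PySem.Chars.find_nonneg_iff] at hn
    simp [hn]
  · have hn := (PySem.Chars.isIn_eq_false_iff sub s).mp h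
    rw [← PySem.Chars.find_nonneg_iff] at hn
    simp [hn]

-- A's or-chain condition agrees with B's substring test
lemma pv_orchain_eq (w : String) : decide (pvAOrChain w ≥ 0) = pvMoneyHint w := by
  unfold pvAOrChain pvMoneyHint
  have e1 : ("$" : String).toList = ['$'] := rfl
  have e2 : ("dollar" : String).toList = ['d', 'o', 'l', 'l', 'a', 'r'] := rfl
  have e3 : ("usd" : String).toList = ['u', 's', 'd'] := rfl
  simp only [PySem.Str.find_eq, PySem.Str.isIn_eq, pv_isIn_eq_decide, ge_iff_le, e1, e2, e3]
  split_ifs with h1 h2 <;> simp_all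

-- 'any(letter for letter in word if letter == '$')' is the substring test '$' in word
lemma pv_any_dollar_eq (w : String) :
    (w.toList.any fun l => l == '$') = PySem.Str.isIn "$" w := by
  by_cases h : '$' ∈ w.toList
  · have l2 : PySem.Str.isIn "$" w = true := by
      rw [PySem.Str.isIn_iff_infix]
      rcases List.append_of_mem h with ⟨pre, suf, hw⟩
      exact ⟨pre, suf, by simp [hw]⟩
    rw [l2]
    simp only [List.any_eq_true, beq_iff_eq]
    exact ⟨'$', h, rfl⟩
  · have l2 : PySem.Str.isIn "$" w = false := by
      rw [← Bool.not_eq_true, PySem.Str.isIn_iff_infix]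
      intro hin
      exact h (hin.subset (by decide))
    rw [l2]
    simp only [List.any_eq_false, beq_iff_eq]
    intro c hc
    exact fun hcc => h (hcc ▸ hc)

def pvHeadHint : List String → Bool
  | [] => false
  | w :: _ => pvMoneyHint w

lemma pv_loop_eq (ws : List String) (flag : Bool) :
    pvALoop ws flag =
      ((flag && pvHeadHint ws) ||
       ws.any (fun w => pvHasDigit w && PySem.Str.isIn "$" w) ||
       (ws.zip ws.tail).any (fun p => pvHasDigit p.1 && pvMoneyHint p.2)) := by
  induction ws generalizing flag with
  | nil => simp [pvALoop, pvHeadHint]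
  | cons w t ih =>
    rw [pvALoop_cons]
    have hd : (w.toList.filter (fun l => PySem.Chars.isdigit l)).any (fun _ => true)
        = pvHasDigit w := pv_filter_any _ _
    have hs : (w.toList.filter (fun l => l == '$')).any (fun _ => true)
        = PySem.Str.isIn "$" w := by
      rw [pv_filter_any]; exact pv_any_dollar_eq w
    rw [hd, hs, pv_orchain_eq]
    rcases t with _ | ⟨w2, t2⟩
    · cases flag <;> cases hb : pvMoneyHint w <;>
        cases h1 : pvHasDigit w <;> cases h2 : PySem.Str.isIn "$" w <;>
        simp_all [pvALoop, pvHeadHint]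
    · rw [ih true, ih false]
      cases flag <;> cases hb : pvMoneyHint w <;>
        cases h1 : pvHasDigit w <;> cases h2 : PySem.Str.isIn "$" w <;>
        simp_all [pvHeadHint, Bool.or_assoc, Bool.or_left_comm]

-- ===== VERDICT (by name: the statement is the Claim_ definition above) =====
theorem search_money_in_words_spec : Claim_equal_search_money_in_words := by
  intro words _
  unfold Spec_search_money_in_words search_money_in_words search_money_in_words_alt
  rw [pv_loop_eq, PySem.List.slice_from_one]
  simp
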